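-- pv_equiv track=rewrite | github.com/btrotta/advent-of-code-2024 | day21b.py | move_arm_numeric
-- ===== SOURCE A (Python) =====
-- def move_arm_numeric(pos, input):
--     # move arm that operates numeric keypad
--     # given current pointing position and input, return new position and whether button is pushed
--     # return None for gaps
--     if input == "A":
--         return pos, True
--     if input == "^":
--         move = {str(x): str(x + 3) for x in range(1, 7)}
--         move.update({str(x): None for x in range(7, 10)})
--         move.update({"0": "2", "A": "3"})
--     elif input == ">":
--         move = {str(x): str(x + 1) for x in [1, 4, 7, 2, 5, 8]}
--         move.update({str(x): None for x in [3, 6, 9]})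
--         move.update({"0": "A", "A": None})
--     elif input == "v":
--         move = {str(x): str(x - 3) for x in range(4, 10)}
--         move.update({"1": None, "2": "0", "3": "A", "0": None, "A": None})
--     elif input == "<":
--         move = {str(x):  str(x - 1) for x in [2, 5, 8, 3, 6, 9]}
--         move.update({str(x): None for x in [1, 4, 7]})
--         move.update({"0": None, "A": "0"})
--     return move[pos], False
-- ===== SOURCE B (Python) =====
-- COORD = {'7': (0, 0), '8': (0, 1), '9': (0, 2),
--          '4': (1, 0), '5': (1, 1), '6': (1, 2),
--          '1': (2, 0), '2': (2, 1), '3': (2, 2),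
--                       '0': (3, 1), 'A': (3, 2)}
-- BUTTON = {v: k for k, v in COORD.items()}
-- DELTA = {'^': (-1, 0), 'v': (1, 0), '<': (0, -1), '>': (0, 1)}
--
--
-- def move_arm_numeric(pos, input):
--     # move arm that operates numeric keypad, modelled as a grid
--     if input == "A":
--         return pos, True
--     r, c = COORD[pos]
--     dr, dc = DELTA[input]
--     return BUTTON.get((r + dr, c + dc)), False
-- ===== Notes on version B (the rewrite author's own statement) =====
-- stated objective: simpler
-- what changed: B replaces A's four per-direction 11-entry rebuilt dictionaries with a single coordinate model: each button has a fixed (row,col), the direction is a delta, and the target button is a reverse lookup that is naturally None off-grid or on the gap.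
import Mathlib
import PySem

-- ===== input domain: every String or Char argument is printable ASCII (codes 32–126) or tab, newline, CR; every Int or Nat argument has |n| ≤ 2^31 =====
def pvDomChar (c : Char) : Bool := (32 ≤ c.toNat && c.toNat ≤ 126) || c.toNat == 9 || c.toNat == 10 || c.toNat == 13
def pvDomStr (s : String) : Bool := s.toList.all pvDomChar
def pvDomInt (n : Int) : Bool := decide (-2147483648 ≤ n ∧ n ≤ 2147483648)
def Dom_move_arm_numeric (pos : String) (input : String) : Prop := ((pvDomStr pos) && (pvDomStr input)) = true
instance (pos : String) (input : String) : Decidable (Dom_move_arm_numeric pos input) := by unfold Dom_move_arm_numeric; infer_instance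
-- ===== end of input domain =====

-- B models the keypad as a coordinate grid (one coord map + a delta per direction) instead of
-- A's four per-direction 11-entry dictionaries rebuilt on every call; objective: simpler.

-- ===== PORT A =====
-- A builds, per direction, a dict String -> Option String via comprehensions and updates,
-- then indexes it with move[pos]. KeyError (pos not a key) and NameError (input not one of
-- the four directions, so 'move' is unbound) are excluded by Pre_; outside Pre_ the port's
-- value (getD-default none / empty dict) is not claimed.
def move_arm_numeric (pos : String) (input : String) : Option String × Bool :=
  if input = "A" then (some pos, true)
  else
    let move : PySem.Dict String (Option String) :=
      if input = "^" then
        let m := (PySem.List.pyRange 1 7 1).foldl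
          (fun d x => d.insert (PySem.Int.toStr x) (some (PySem.Int.toStr (x + 3)))) PySem.Dict.empty
        let m := (PySem.List.pyRange 7 10 1).foldl
          (fun d x => d.insert (PySem.Int.toStr x) none) m
        (m.insert "0" (some "2")).insert "A" (some "3")
      else if input = ">" then
        let m := ([1, 4, 7, 2, 5, 8] : List Int).foldl
          (fun d x => d.insert (PySem.Int.toStr x) (some (PySem.Int.toStr (x + 1)))) PySem.Dict.empty
        let m := ([3, 6, 9] : List Int).foldl
          (fun d x => d.insert (PySem.Int.toStr x) none) m
        (m.insert "0" (some "A")).insert "A" none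
      else if input = "v" then
        let m := (PySem.List.pyRange 4 10 1).foldl
          (fun d x => d.insert (PySem.Int.toStr x) (some (PySem.Int.toStr (x - 3)))) PySem.Dict.empty
        ((((m.insert "1" none).insert "2" (some "0")).insert "3" (some "A")).insert "0" none).insert "A" none
      else if input = "<" then
        let m := ([2, 5, 8, 3, 6, 9] : List Int).foldl
          (fun d x => d.insert (PySem.Int.toStr x) (some (PySem.Int.toStr (x - 1)))) PySem.Dict.empty
        let m := ([1, 4, 7] : List Int).foldl
          (fun d x => d.insert (PySem.Int.toStr x) none) m
        (m.insert "0" none).insert "A" (some "0")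
      else PySem.Dict.empty   -- Python: NameError here; excluded by Pre_
    (move.getD pos none, false)   -- move[pos]; KeyError excluded by Pre_

-- ===== PORT B =====
def pvCoord : PySem.Dict String (Int × Int) :=
  PySem.Dict.ofList [("7", (0, 0)), ("8", (0, 1)), ("9", (0, 2)),
                     ("4", (1, 0)), ("5", (1, 1)), ("6", (1, 2)),
                     ("1", (2, 0)), ("2", (2, 1)), ("3", (2, 2)),
                     ("0", (3, 1)), ("A", (3, 2))]

def pvButton : PySem.Dict (Int × Int) String :=
  PySem.Dict.ofList (pvCoord.items.map (fun kv => (kv.2, kv.1)))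

def pvDelta : PySem.Dict String (Int × Int) :=
  PySem.Dict.ofList [("^", (-1, 0)), ("v", (1, 0)), ("<", (0, -1)), (">", (0, 1))]

def move_arm_numeric_alt (pos : String) (input : String) : Option String × Bool :=
  if input = "A" then (some pos, true)
  else
    let rc := pvCoord.getD pos (0, 0)      -- COORD[pos]; KeyError excluded by Pre_
    let d := pvDelta.getD input (0, 0)     -- DELTA[input]; KeyError excluded by Pre_
    (pvButton.get? (rc.1 + d.1, rc.2 + d.2), false)

-- ===== PRECONDITION & SPEC =====
-- Pre_ excludes exactly the inputs where A raises: input must be one of the five buttons,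
-- and unless input is "A", pos must be a key of the numeric keypad.
def Pre_move_arm_numeric (pos : String) (input : String) : Prop :=
  input ∈ (["A", "^", ">", "v", "<"] : List String) ∧
  (input = "A" ∨ pos ∈ (["0", "1", "2", "3", "4", "5", "6", "7", "8", "9", "A"] : List String))
instance (pos : String) (input : String) : Decidable (Pre_move_arm_numeric pos input) := by
  unfold Pre_move_arm_numeric; infer_instance

def pvWitness_move_arm_numeric : String × String := ("5", "^")

def Spec_move_arm_numeric (pos : String) (input : String) (out : Option String × Bool) : Prop := out = move_arm_numeric_alt pos input
instance (pos : String) (input : String) (out : Option String × Bool) : Decidable (Spec_move_arm_numeric pos input out) := by unfold Spec_move_arm_numeric; infer_instance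

-- ===== CLAIM (what is proved, stated in full; the proofs are below) =====
def Claim_equal_move_arm_numeric : Prop := ∀ (pos : String) (input : String), Dom_move_arm_numeric pos input → Pre_move_arm_numeric pos input → Spec_move_arm_numeric pos input (move_arm_numeric pos input)

-- ===== LEMMAS AND PROOFS =====
theorem move_arm_both_A (pos : String) :
    move_arm_numeric pos "A" = move_arm_numeric_alt pos "A" := by
  simp [move_arm_numeric, move_arm_numeric_alt]

-- ===== VERDICT (by name: the statement is the Claim_ definition above) =====
theorem move_arm_numeric_spec : Claim_equal_move_arm_numeric := by
  intro pos input _ hpre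
  unfold Spec_move_arm_numeric
  obtain ⟨hin, hpos⟩ := hpre
  rcases hpos with rfl | hpos
  · exact move_arm_both_A pos
  · fin_cases hin <;> first
      | exact move_arm_both_A pos
      | fin_cases hpos <;> decide
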